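/- GENERATED by mk_final_copies.py from the proof of the farm's unit `start_decoder.C10` (farm:start_decoder.C10.1: Proof.lean) as the
   re-elaboration sweep compiled it — do not edit. -/
import Asan.CheckWalk
import Vorbis.Spec.Units.start_decoder_C10
import Vorbis.Spec.Worked.start_decoder_C10_Lemmas

namespace Vorbis.Spec.start_decoder_C10
open X86 X86.User Asan Vorbis Vorbis.Spec Vorbis.Spec.StartDecoder

/-- The value `add dword [rsp+30H], 1` stores: `i + 1` does not wrap (`i + 1 ≤ codebook_count ≤ 256`). -/
theorem incr_fits (i : Nat) (hi : i + 1 ≤ 256) : (BitVec.ofNat 32 i + 1#32).toNat = i + 1 := by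
  rw [BitVec.toNat_add, BitVec.toNat_ofNat]
  simp only [BitVec.toNat_ofNat]
  omega

end Vorbis.Spec.start_decoder_C10

open X86 X86.User Asan Vorbis Vorbis.Spec Vorbis.Spec.StartDecoder

set_option maxRecDepth 4000
set_option maxHeartbeats 4000000

/-- Segment `C10` of `start_decoder` (0x114788 `add dword [rsp+30H], 1` ; 0x11478d `jmp 114298`; stb_vorbis_fixed.c:3746 `++i`):
from the assertion `AtC10 i` (= `SD4 (i + 1)` with the slot still holding `i`) to the loop head's `AtC2 (i + 1)`. The only store
goes into the spill slot of `i` in start_decoder's own frame; everything else is carried by `exit_c2` (Lemmas.lean). -/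
theorem Vorbis.Spec.Worked.start_decoder_C10_ok : Vorbis.Spec.start_decoder_C10.Statement := by
  unfold Vorbis.Spec.start_decoder_C10.Statement
  intro Lay hLay μ hμ u₀ hcode g i v hat
  obtain ⟨A, hb⟩ := hat
  -- 1. the ENTRY state's facts, from the `AtEntry` the assertion carries
  have fr := hb.frame
  have he := fr.entry
  v_entry he
  simp only [depth] at he_room he_stack
  -- 2. the PRESENT state's facts under the names the walker reads
  have w_rip := fr.rip
  have w_eq : Mem.EqOn Vorbis.L.textLo Vorbis.L.textHi u₀.mem v.mem := fr.code
  have hdf : v.flags .df = false := (show abiInv _ from fr.inv).1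
  have hmx : v.mxcsr &&& 0x1F80 = 0x1F80 := (show abiInv _ from fr.inv).2
  have hsse := Vorbis.sseOK_of_abiInv fr.inv
  -- the steady stack pointer `R = RA − 1480` and the slot of `i`, spelled from the entry's rsp
  have hR : g.R = (g.e.reg .rsp).toNat - 1480 := rfl
  have eR : addr g.R = g.e.reg .rsp - 1480 := by
    symm
    apply eq_addr
    u_omega
  have e30 : addr (g.R + 0x30) = g.e.reg .rsp - 1432 := by
    symm
    apply eq_addr
    u_omega
  have w_rsp : v.reg .rsp = g.e.reg .rsp - 1480 := by
    rw [← eR]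
    exact fr.rsp
  -- 3. the slot the segment loads: `i` of line 3746
  have s_i : v.mem.readLE (g.e.reg .rsp - 1432) 4 = i := by
    rw [← e30]
    exact hb.slot_i
  -- `i + 1 ≤ codebook_count ≤ 256`
  have hi256 : i + 1 ≤ 256 := by
    obtain ⟨A2, A3, ha⟩ := hb.ages
    have h1 := ha.n_le
    have h2 := ha.F1.2
    omega
  -- 4. the walk: 0x114788 `add dword [rsp+30H], 1`, 0x11478d `jmp 114298`
  u_walk hcode [hμ.vendor] until [Vorbis.L.start_decoder.cut81] span [Vorbis.L.textLo, Vorbis.L.textHi] side (v_side)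
  -- 5. the exit at the cut point 0x114298 (the head of loop 3746): `AtC2 (i + 1)`
  rw [← e30, Vorbis.Spec.start_decoder_C10.incr_fits i hi256] at w_mem
  have hRlt : g.R + 0x30 + 4 < 2 ^ 64 := by u_omega
  refine ReachVia.done ⟨A, Vorbis.Spec.start_decoder_C10.exit_c2 hb w_rip ?_ ?_ w_eq ?_ ?_⟩
  · -- rsp is the steady stack pointer still
    rw [w_kept .rsp rfl]
    exact fr.rsp
  · -- DF = 0, the MXCSR masks
    v_inv
  · -- the footprint: the slot of `i`
    rw [w_mem]
    apply Mem.SameExcept.writeLE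
    · rw [toNat_addr _ (by omega)]
      exact hRlt
    · refine ⟨⟨g.R + 0x30, g.R + 0x34⟩, List.mem_singleton.mpr rfl, ?_, ?_⟩
      · rw [toNat_addr _ (by omega)]
        exact Nat.le_refl _
      · rw [toNat_addr _ (by omega)]
        exact Nat.le_refl _
  · -- the slot now holds `i + 1`
    rw [w_mem]
    unfold Mem.u32
    rw [Mem.readLE_writeLE_same _ _ _ _ (by decide)]
    omega
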